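-- pv_equiv track=rewrite | github.com/davll/practical-algorithms | HackerRank/unsolved/decibinary_numbers.py | dec2db
-- ===== SOURCE A (Python) =====
-- def dec2db(x):
--     y = 0
--     e = 1
--     while x > 0:
--         y = y + (x % 2) * e
--         x = x // 2
--         e = e * 10
--     return y
-- ===== SOURCE B (Python) =====
-- def dec2db(x):
--     if x <= 0:
--         return 0
--     return int(bin(x)[2:])
-- ===== Notes on version B (the rewrite author's own statement) =====
-- stated objective: idiomatic
-- what changed: Replaced the explicit bit-extraction loop with place-value accumulator by a single conversion: format x in binary with bin() and parse the digit string back in base 10.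
import Mathlib
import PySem

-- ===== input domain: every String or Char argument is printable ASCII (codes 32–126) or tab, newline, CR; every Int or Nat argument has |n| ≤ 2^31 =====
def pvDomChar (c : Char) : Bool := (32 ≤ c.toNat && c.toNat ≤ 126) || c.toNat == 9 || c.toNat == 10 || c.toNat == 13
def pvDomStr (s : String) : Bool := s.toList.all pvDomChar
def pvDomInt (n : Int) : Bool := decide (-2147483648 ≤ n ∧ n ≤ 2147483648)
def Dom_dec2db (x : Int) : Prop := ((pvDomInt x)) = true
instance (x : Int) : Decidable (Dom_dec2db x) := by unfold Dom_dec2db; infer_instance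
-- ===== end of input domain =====

-- B replaces A's bit-extraction loop (accumulator y, place value e) by formatting x in
-- binary and parsing the digit string in base 10; idiomatic, same cost.

-- ===== PORT A =====
-- while x > 0: y += (x % 2) * e; x //= 2; e *= 10
def dec2dbGo (x y e : Int) : Int :=
  if h : x > 0 then
    dec2dbGo (PySem.Int.floordiv x 2) (y + (PySem.Int.mod x 2) * e) (e * 10)
  else y
termination_by x.toNat
decreasing_by
  have h2 : PySem.Int.floordiv x 2 = x / 2 := PySem.Int.floordiv_eq_ediv_of_pos (by omega)
  rw [h2]; omega

def dec2db (x : Int) : Int := dec2dbGo x 0 1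

-- ===== PORT B =====
-- bin(x)[2:] : the binary digits of x, most significant first (bin builds them by repeated division)
def binDigits : Nat → List Nat
  | 0 => []
  | n + 1 => binDigits ((n + 1) / 2) ++ [(n + 1) % 2]
decreasing_by omega

-- int(s) over the decimal digit string: left fold acc*10 + digit
def dec2db_alt (x : Int) : Int :=
  if x ≤ 0 then 0
  else (binDigits x.toNat).foldl (fun (a : Int) (d : Nat) => a * 10 + (d : Int)) 0

-- ===== PRECONDITION & SPEC =====
def Spec_dec2db (x : Int) (out : Int) : Prop := out = dec2db_alt x
instance (x : Int) (out : Int) : Decidable (Spec_dec2db x out) := by unfold Spec_dec2db; infer_instance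

-- ===== CLAIM (what is proved, stated in full; the proofs are below) =====
def Claim_equal_dec2db : Prop := ∀ (x : Int), Dom_dec2db x → Spec_dec2db x (dec2db x)

-- ===== LEMMAS AND PROOFS =====

-- common characterisation: the decibinary value of n
def dbVal : Nat → Int
  | 0 => 0
  | n + 1 => dbVal ((n + 1) / 2) * 10 + ((n + 1) % 2 : Nat)
decreasing_by omega

theorem dec2dbGo_eq (n : Nat) : ∀ (x y e : Int), x.toNat = n → dec2dbGo x y e = y + e * dbVal n := by
  induction n using Nat.strong_induction_on with
  | _ n ih =>
    intro x y e hx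
    rw [dec2dbGo]
    split_ifs with h
    · have hx' : x = (n : Int) := by omega
      subst hx'
      have hn : 0 < n := by exact_mod_cast h
      have hfd : PySem.Int.floordiv (n : Int) 2 = ((n / 2 : Nat) : Int) := by
        exact_mod_cast PySem.Int.floordiv_natCast n 2
      have hmd : PySem.Int.mod (n : Int) 2 = ((n % 2 : Nat) : Int) := by
        exact_mod_cast PySem.Int.mod_natCast n 2
      rw [hfd, hmd, ih (n / 2) (by omega) _ _ _ (by omega)]
      obtain ⟨m, rfl⟩ : ∃ m, n = m + 1 := ⟨n - 1, by omega⟩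
      rw [dbVal]
      push_cast
      ring
    · have hn : n = 0 := by omega
      subst hn
      rw [dbVal]; ring

theorem foldl_binDigits (n : Nat) : ∀ (a : Int),
    (binDigits n).foldl (fun (a : Int) (d : Nat) => a * 10 + (d : Int)) a = a * 10 ^ (binDigits n).length + dbVal n := by
  induction n using Nat.strong_induction_on with
  | _ n ih =>
    intro a
    match n with
    | 0 => simp [binDigits, dbVal]
    | m + 1 =>
      rw [binDigits, dbVal, List.foldl_append, ih ((m + 1) / 2) (by omega)]
      simp [List.foldl, pow_succ]
      ring

-- ===== VERDICT (by name: the statement is the Claim_ definition above) =====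
theorem dec2db_spec : Claim_equal_dec2db := by
  intro x _
  unfold Spec_dec2db dec2db dec2db_alt
  rw [dec2dbGo_eq x.toNat x 0 1 rfl]
  split_ifs with h
  · have : x.toNat = 0 := by omega
    rw [this, dbVal]; ring
  · rw [foldl_binDigits]; ring
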